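-- pv_equiv track=rewrite | github.com/PaulineTurk/test_brier_bis_asym | MNHN/brierNeighbour/selection_example.py | get_bound_position
-- ===== SOURCE A (Python) =====
-- def get_bound_position(len_seq, context_kl, context_kr, context_pl, context_pr):  # à bien couvrir toutes les situations car il y a aussi des courts peptides
--                                                                                   # et on envisage d'aller voir au moins jusqu'à 10 voisins
--     """
--
--
--
--
--     ATTENTION CETTE BOUND CHANGÉ A LA SAUVAGE POUR NE PAS CONSIDÉRER LE EX PRIS DES AA DE BORD
--
--
--
--
--     Bound of position that are valid according to the contextual window defined
--
--     return:
--         valid_interval: ensemble définissant les positions valides selon la fenetre de contexte local choisi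
--     """
--     valid_interval = []
--     max_left_window = max(context_kl, context_pl)
--     max_right_window = max(context_kr, context_pr)
--     #for index in range(0, len_seq):
--     for index in range(1, len_seq-1):
--         if 0 <= index - max_left_window <= len_seq -1 and 0 <= index + max_right_window <= len_seq -1:
--             valid_interval.append(index)
--     valid_interval_ensemble = set(valid_interval) # conversion en ensemble
--
--     return valid_interval_ensemble
-- ===== SOURCE B (Python) =====
-- def get_bound_position(len_seq, context_kl, context_kr, context_pl, context_pr):
--     # Closed form: the valid indices form a contiguous interval, so compute its
--     # endpoints directly from the inequalities instead of scanning every index.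
--     max_left_window = max(context_kl, context_pl)
--     max_right_window = max(context_kr, context_pr)
--     lo = max(1, max_left_window, -max_right_window)
--     hi = min(len_seq - 2, max_left_window + len_seq - 1, len_seq - 1 - max_right_window)
--     return set(range(lo, hi + 1))
-- ===== Notes on version B (the rewrite author's own statement) =====
-- stated objective: faster
-- what changed: Replaces the per-index scan over range(1, len_seq-1) with a closed-form computation of the interval endpoints (lo = max of the lower bounds, hi = min of the upper bounds) and returns set(range(lo, hi+1)).
import Mathlib
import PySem

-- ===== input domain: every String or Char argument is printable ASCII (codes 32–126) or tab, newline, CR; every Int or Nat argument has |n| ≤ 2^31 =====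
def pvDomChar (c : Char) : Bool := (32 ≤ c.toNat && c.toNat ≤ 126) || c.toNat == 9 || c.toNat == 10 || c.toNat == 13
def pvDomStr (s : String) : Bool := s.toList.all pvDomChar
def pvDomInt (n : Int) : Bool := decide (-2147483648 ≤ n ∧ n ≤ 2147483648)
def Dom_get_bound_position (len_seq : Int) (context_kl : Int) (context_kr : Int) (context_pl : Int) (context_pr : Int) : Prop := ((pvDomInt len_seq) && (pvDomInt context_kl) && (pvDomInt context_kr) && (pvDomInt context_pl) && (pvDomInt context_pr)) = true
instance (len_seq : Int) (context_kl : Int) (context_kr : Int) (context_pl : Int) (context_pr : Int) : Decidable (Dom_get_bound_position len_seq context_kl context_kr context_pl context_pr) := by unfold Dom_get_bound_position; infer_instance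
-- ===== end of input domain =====

-- ===== PORT A =====
-- Port of A: scan range(1, len_seq-1), append valid indices, convert to a set.
def get_bound_position (len_seq : Int) (context_kl : Int) (context_kr : Int) (context_pl : Int) (context_pr : Int) : List Int :=
  let max_left_window := max context_kl context_pl
  let max_right_window := max context_kr context_pr
  let valid_interval := (PySem.List.pyRange 1 (len_seq - 1) 1).foldl
    (fun acc index =>
      if 0 ≤ index - max_left_window ∧ index - max_left_window ≤ len_seq - 1 ∧
         0 ≤ index + max_right_window ∧ index + max_right_window ≤ len_seq - 1
      then acc ++ [index] else acc) []
  PySem.Set.ofList valid_interval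

-- ===== PORT B =====
-- Port of B: closed-form interval endpoints, then set(range(lo, hi+1)).
def get_bound_position_alt (len_seq : Int) (context_kl : Int) (context_kr : Int) (context_pl : Int) (context_pr : Int) : List Int :=
  let max_left_window := max context_kl context_pl
  let max_right_window := max context_kr context_pr
  let lo := max (max 1 max_left_window) (-max_right_window)
  let hi := min (min (len_seq - 2) (max_left_window + len_seq - 1)) (len_seq - 1 - max_right_window)
  PySem.Set.ofList (PySem.List.pyRange lo (hi + 1) 1)

-- ===== PRECONDITION & SPEC =====
def Spec_get_bound_position (len_seq : Int) (context_kl : Int) (context_kr : Int) (context_pl : Int) (context_pr : Int) (out : List Int) : Prop := out = get_bound_position_alt len_seq context_kl context_kr context_pl context_pr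
instance (len_seq : Int) (context_kl : Int) (context_kr : Int) (context_pl : Int) (context_pr : Int) (out : List Int) : Decidable (Spec_get_bound_position len_seq context_kl context_kr context_pl context_pr out) := by unfold Spec_get_bound_position; infer_instance

-- ===== CLAIM (what is proved, stated in full; the proofs are below) =====
def Claim_equal_get_bound_position : Prop := ∀ (len_seq : Int) (context_kl : Int) (context_kr : Int) (context_pl : Int) (context_pr : Int), Dom_get_bound_position len_seq context_kl context_kr context_pl context_pr → Spec_get_bound_position len_seq context_kl context_kr context_pl context_pr (get_bound_position len_seq context_kl context_kr context_pl context_pr)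

-- ===== LEMMAS AND PROOFS =====
-- The indices A keeps from range(1, len_seq-1) are exactly the interval [lo, hi] B computes.
theorem pv_filter_eq_range (len_seq L R : Int) :
    (PySem.List.pyRange 1 (len_seq - 1) 1).filter
      (fun i => decide (0 ≤ i - L ∧ i - L ≤ len_seq - 1 ∧ 0 ≤ i + R ∧ i + R ≤ len_seq - 1))
    = PySem.List.pyRange (max (max 1 L) (-R))
        (min (min (len_seq - 2) (L + len_seq - 1)) (len_seq - 1 - R) + 1) 1 := by
  have hperm : ((PySem.List.pyRange 1 (len_seq - 1) 1).filter
      (fun i => decide (0 ≤ i - L ∧ i - L ≤ len_seq - 1 ∧ 0 ≤ i + R ∧ i + R ≤ len_seq - 1))).Perm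
      (PySem.List.pyRange (max (max 1 L) (-R))
        (min (min (len_seq - 2) (L + len_seq - 1)) (len_seq - 1 - R) + 1) 1) := by
    refine (List.perm_ext_iff_of_nodup ?_ ?_).mpr ?_
    · exact (PySem.List.nodup_pyRange_one 1 (len_seq - 1)).filter _
    · exact PySem.List.nodup_pyRange_one _ _
    · intro x
      simp [List.mem_filter, PySem.List.mem_pyRange_one]
      omega
  refine hperm.eq_of_pairwise (le := (· ≤ ·)) ?_ ?_ ?_
  · intro a b _ _ h1 h2; omega
  · exact (List.Pairwise.sublist List.filter_sublist
      (PySem.List.pairwise_lt_pyRange_one 1 (len_seq - 1))).imp le_of_lt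
  · exact (PySem.List.pairwise_lt_pyRange_one _ _).imp le_of_lt

-- ===== VERDICT (by name: the statement is the Claim_ definition above) =====
theorem get_bound_position_spec : Claim_equal_get_bound_position := by
  intro len_seq context_kl context_kr context_pl context_pr _
  unfold Spec_get_bound_position get_bound_position get_bound_position_alt
  set L := max context_kl context_pl
  set R := max context_kr context_pr
  have hfold : (PySem.List.pyRange 1 (len_seq - 1) 1).foldl
      (fun acc index =>
        if 0 ≤ index - L ∧ index - L ≤ len_seq - 1 ∧
           0 ≤ index + R ∧ index + R ≤ len_seq - 1
        then acc ++ [index] else acc) []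
      = (PySem.List.pyRange 1 (len_seq - 1) 1).filter
          (fun i => decide (0 ≤ i - L ∧ i - L ≤ len_seq - 1 ∧ 0 ≤ i + R ∧ i + R ≤ len_seq - 1)) := by
    simpa using PySem.List.foldl_append_if (f := fun i : Int => i)
      (p := fun i => decide (0 ≤ i - L ∧ i - L ≤ len_seq - 1 ∧ 0 ≤ i + R ∧ i + R ≤ len_seq - 1))
      (PySem.List.pyRange 1 (len_seq - 1) 1) []
  simp only [hfold, pv_filter_eq_range len_seq L R]
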